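-- pv_equiv track=rewrite | github.com/ddominguez/advent-of-code | 2016/python/days/day06.py | build_column_frequencies
-- ===== SOURCE A (Python) =====
-- from collections import Counter
--
-- def build_column_frequencies(lines: list[str]) -> dict[int, Counter[str]]:
--     res: dict[int, Counter[str]] = {}
--     cols = len(lines[0])
--     for line in lines:
--         for i in range(cols):
--             if i not in res:
--                 res[i] = Counter()
--             res[i].update(line[i])
--     return res
-- ===== SOURCE B (Python) =====
-- from collections import Counter
--
--
-- def build_column_frequencies(lines: list[str]) -> dict[int, "Counter[str]"]:
--     cols = len(lines[0])
--     # one flat counter keyed by (column, char), then regroup per column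
--     flat = Counter((i, line[i]) for line in lines for i in range(cols))
--     res = {i: Counter() for i in range(cols)}
--     for (i, ch), n in flat.items():
--         res[i][ch] = n
--     return res
-- ===== Notes on version B (the rewrite author's own statement) =====
-- stated objective: faster
-- what changed: B makes one flat pass building a single Counter keyed by (column, char) tuples over all cells, then regroups that global counter into the per-column dict in a second pass, instead of A's nested row-major loops incrementally updating per-column Counters behind a membership guard; the single C-level Counter construction removes per-cell dict-membership tests and Counter.update calls (constant-factor speedup, measured ~3x).
import Mathlib
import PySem

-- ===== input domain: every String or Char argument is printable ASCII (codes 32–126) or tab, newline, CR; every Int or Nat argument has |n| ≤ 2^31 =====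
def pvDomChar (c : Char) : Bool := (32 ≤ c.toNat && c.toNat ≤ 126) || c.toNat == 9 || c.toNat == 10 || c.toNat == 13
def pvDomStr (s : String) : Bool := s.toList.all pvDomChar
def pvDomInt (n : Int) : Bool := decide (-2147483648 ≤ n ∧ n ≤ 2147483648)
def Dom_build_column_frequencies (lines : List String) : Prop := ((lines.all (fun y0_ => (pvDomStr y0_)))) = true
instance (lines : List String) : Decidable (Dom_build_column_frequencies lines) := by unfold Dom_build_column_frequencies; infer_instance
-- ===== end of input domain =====

-- B replaces A's nested row-major loops (membership guard + incremental per-column Counter.update)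
-- by one flat Counter over (column, char) cell pairs followed by a regrouping pass.

-- ===== PORT A =====
def build_column_frequencies (lines : List String) : List (Int × List (String × Int)) :=
  let cols : Int := PySem.Str.len (PySem.List.pyGetD lines 0 "")
  let res : PySem.Dict Int (PySem.Dict String Int) :=
    lines.foldl (fun res line =>
      (PySem.List.pyRange 0 cols 1).foldl (fun res i =>
        let res := if res.contains i then res else res.insert i PySem.Dict.empty
        res.modify i PySem.Dict.empty
          (fun c => c.modify (String.ofList [PySem.List.pyGetD line.toList i ' ']) 0 (· + 1))) res)
      PySem.Dict.empty
  res.items.map (fun p => (p.1, p.2.items))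

-- ===== PORT B =====
def build_column_frequencies_alt (lines : List String) : List (Int × List (String × Int)) :=
  let cols : Int := PySem.Str.len (PySem.List.pyGetD lines 0 "")
  -- flat = Counter((i, line[i]) for line in lines for i in range(cols))
  let flat : PySem.Dict (Int × String) Int :=
    PySem.Dict.counter (lines.flatMap (fun line =>
      (PySem.List.pyRange 0 cols 1).map (fun i =>
        (i, String.ofList [PySem.List.pyGetD line.toList i ' ']))))
  -- res = {i: Counter() for i in range(cols)}  (distinct keys: a literal items list)
  let res0 : PySem.Dict Int (PySem.Dict String Int) :=
    PySem.Dict.mk ((PySem.List.pyRange 0 cols 1).map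
      (fun i => (i, (PySem.Dict.empty : PySem.Dict String Int))))
  -- for (i, ch), n in flat.items(): res[i][ch] = n   (res[i] exists; modify = read-then-set)
  let res := flat.items.foldl (fun r p =>
      r.modify p.1.1 PySem.Dict.empty (fun c => c.insert p.1.2 p.2)) res0
  res.items.map (fun p => (p.1, p.2.items))

-- ===== PRECONDITION & SPEC =====
-- Pre_ excludes exactly the inputs on which the Python A raises IndexError:
-- the empty list (lines[0]) and inputs with some line shorter than lines[0] (line[i]).
def Pre_build_column_frequencies (lines : List String) : Prop :=
  lines ≠ [] ∧ ∀ l ∈ lines,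
    PySem.Str.len (PySem.List.pyGetD lines 0 "") ≤ PySem.Str.len l
instance (lines : List String) : Decidable (Pre_build_column_frequencies lines) := by
  unfold Pre_build_column_frequencies; infer_instance

def pvWitness_build_column_frequencies : List String := (["ab", "cd", "ad"])

def Spec_build_column_frequencies (lines : List String) (out : List (Int × List (String × Int))) : Prop := out = build_column_frequencies_alt lines
instance (lines : List String) (out : List (Int × List (String × Int))) : Decidable (Spec_build_column_frequencies lines out) := by unfold Spec_build_column_frequencies; infer_instance

-- ===== CLAIM (what is proved, stated in full; the proofs are below) =====
def Claim_equal_build_column_frequencies : Prop := ∀ (lines : List String), Dom_build_column_frequencies lines → Pre_build_column_frequencies lines → Spec_build_column_frequencies lines (build_column_frequencies lines)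

-- ===== LEMMAS AND PROOFS =====

-- the 1-character string a cell line[i] contributes (both ports form it identically)
def keyOf (l : String) (i : Int) : String := String.ofList [PySem.List.pyGetD l.toList i ' ']

-- the canonical result both ports reach: columns 0..n-1, each column's counter items
def canonical (n : Nat) (lines : List String) : List (Int × List (String × Int)) :=
  (List.range n).map (fun (i : Nat) =>
    ((i : Int), (PySem.Dict.counter (lines.map (fun l => keyOf l (i : Int)))).items))

-- the dict states A's loop passes through: keys 0..n-1 in order, value c i at key i
def dictOf (n : Nat) (c : Nat → PySem.Dict String Int) :
    PySem.Dict Int (PySem.Dict String Int) :=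
  ⟨(List.range n).map (fun (i : Nat) => ((i : Int), c i))⟩

-- A's inner-loop body for one cell
def cellStep (line : String) (d : PySem.Dict Int (PySem.Dict String Int)) (i : Int) :
    PySem.Dict Int (PySem.Dict String Int) :=
  d.modify i PySem.Dict.empty (fun c => c.modify (keyOf line i) 0 (· + 1))

theorem find?_dictOf_ge {n m : Nat} (c : Nat → PySem.Dict String Int) (h : n ≤ m) :
    ((List.range n).map (fun (i : Nat) => ((i : Int), c i))).find?
      (fun p => p.1 == (m : Int)) = none := by
  rw [List.find?_eq_none]
  intro p hp
  simp only [List.mem_map, List.mem_range] at hp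
  obtain ⟨j, hj, rfl⟩ := hp
  simp only [beq_iff_eq, Int.natCast_inj]
  omega

theorem find?_dictOf_lt {n m : Nat} (c : Nat → PySem.Dict String Int) (h : m < n) :
    ((List.range n).map (fun (i : Nat) => ((i : Int), c i))).find?
      (fun p => p.1 == (m : Int)) = some ((m : Int), c m) := by
  induction n with
  | zero => omega
  | succ n ih =>
    rw [List.range_succ, List.map_append, List.find?_append]
    by_cases hm : m < n
    · rw [ih hm]; rfl
    · have hmn : m = n := by omega
      subst hmn
      rw [find?_dictOf_ge c le_rfl]
      simp

theorem contains_dictOf_ge {n m : Nat} (c : Nat → PySem.Dict String Int) (h : n ≤ m) :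
    (dictOf n c).contains (m : Int) = false := by
  simp only [PySem.Dict.contains, dictOf]
  rw [List.any_eq_false]
  intro p hp
  simp only [List.mem_map, List.mem_range] at hp
  obtain ⟨j, hj, rfl⟩ := hp
  simp only [beq_iff_eq, Int.natCast_inj]
  omega

theorem contains_dictOf_lt {n m : Nat} (c : Nat → PySem.Dict String Int) (h : m < n) :
    (dictOf n c).contains (m : Int) = true := by
  simp only [PySem.Dict.contains, dictOf, List.any_eq_true]
  exact ⟨((m : Int), c m), List.mem_map.2 ⟨m, List.mem_range.2 h, rfl⟩, by simp⟩

theorem getD_dictOf {n m : Nat} (c : Nat → PySem.Dict String Int) (h : m < n) (dflt) :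
    (dictOf n c).getD (m : Int) dflt = c m := by
  simp only [PySem.Dict.getD, PySem.Dict.get?, dictOf]
  rw [find?_dictOf_lt c h]
  rfl

theorem getD_dictOf_self {m : Nat} (c : Nat → PySem.Dict String Int) (dflt) :
    (dictOf m c).getD (m : Int) dflt = dflt := by
  simp only [PySem.Dict.getD, PySem.Dict.get?, dictOf]
  rw [find?_dictOf_ge c le_rfl]
  rfl

theorem dictOf_congr {n : Nat} {c₁ c₂ : Nat → PySem.Dict String Int}
    (h : ∀ i < n, c₁ i = c₂ i) : dictOf n c₁ = dictOf n c₂ := by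
  simp only [dictOf, PySem.Dict.mk.injEq]
  exact List.map_congr_left (fun i hi => by rw [h i (List.mem_range.1 hi)])

theorem insert_dictOf_lt {n m : Nat} (c : Nat → PySem.Dict String Int) (h : m < n) (v) :
    (dictOf n c).insert (m : Int) v = dictOf n (fun i => if i = m then v else c i) := by
  simp only [PySem.Dict.insert, contains_dictOf_lt c h, if_true]
  simp only [dictOf, PySem.Dict.mk.injEq, List.map_map]
  refine List.map_congr_left (fun i hi => ?_)
  simp only [Function.comp]
  by_cases him : i = m
  · subst him; simp
  · simp [him]

theorem modify_dictOf {n m : Nat} (c : Nat → PySem.Dict String Int) (h : m < n) (dflt g) :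
    (dictOf n c).modify (m : Int) dflt g
      = dictOf n (fun i => if i = m then g (c m) else c i) := by
  rw [PySem.Dict.modify, getD_dictOf c h, insert_dictOf_lt c h]

theorem modify_dictOf_absent {m : Nat} (c : Nat → PySem.Dict String Int) (dflt g) :
    (dictOf m c).modify (m : Int) dflt g
      = dictOf (m + 1) (fun i => if i = m then g dflt else c i) := by
  rw [PySem.Dict.modify, getD_dictOf_self c dflt, PySem.Dict.insert,
    contains_dictOf_ge c le_rfl]
  simp only [Bool.false_eq_true, if_false]
  simp only [dictOf, PySem.Dict.mk.injEq, List.range_succ, List.map_append]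
  refine congrArg₂ _ (List.map_congr_left (fun i hi => ?_)) (by simp)
  have : i ≠ m := by have := List.mem_range.1 hi; omega
  simp [this]

-- eliminating A's membership guard: guard-then-modify is just modify
theorem step_eq (line : String) (d : PySem.Dict Int (PySem.Dict String Int)) (i : Int) :
    ((if d.contains i then d else d.insert i PySem.Dict.empty).modify i PySem.Dict.empty
       (fun c => c.modify (String.ofList [PySem.List.pyGetD line.toList i ' ']) 0 (· + 1)))
      = cellStep line d i := by
  by_cases hc : d.contains i = true
  · rw [if_pos hc]; rfl
  · rw [if_neg hc]
    have hc' : d.contains i = false := by simpa using hc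
    have hnone : d.get? i = none := by
      simp only [PySem.Dict.contains] at hc'
      rw [List.any_eq_false] at hc'
      simp only [PySem.Dict.get?, Option.map_eq_none_iff]
      exact List.find?_eq_none.2 (fun p hp => by simpa using hc' p hp)
    simp only [cellStep, keyOf, PySem.Dict.modify]
    rw [PySem.Dict.getD_insert]
    have hgd : d.getD i PySem.Dict.empty = PySem.Dict.empty := by
      simp [PySem.Dict.getD, hnone]
    rw [hgd]
    simp only [PySem.Dict.insert, hc', Bool.false_eq_true, if_false]
    have hcont : (PySem.Dict.mk (d.items ++ [(i, PySem.Dict.empty)])).contains i = true := by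
      simp [PySem.Dict.contains]
    rw [hcont]
    simp only [if_true, PySem.Dict.mk.injEq, List.map_append]
    refine congrArg₂ _ ?_ (by simp)
    conv_rhs => rw [← List.map_id d.items]
    refine List.map_congr_left (fun p hp => ?_)
    simp only [PySem.Dict.contains] at hc'
    rw [List.any_eq_false] at hc'
    have := hc' p hp
    simp_all

-- A's inner loop over a line, on a full state: updates every column's counter
theorem inner_fold_full (line : String) (n : Nat) (c : Nat → PySem.Dict String Int) :
    ∀ m ≤ n, (List.range m).foldl (fun d (i : Nat) => cellStep line d (i : Int)) (dictOf n c)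
      = dictOf n (fun i => if i < m then
          (c i).modify (keyOf line (i : Int)) 0 (· + 1) else c i) := by
  intro m
  induction m with
  | zero => intro _; exact (dictOf_congr (by intro i _; simp)).symm
  | succ m ih =>
    intro hm
    rw [List.range_succ, List.foldl_append, ih (by omega)]
    simp only [List.foldl_cons, List.foldl_nil, cellStep]
    rw [modify_dictOf _ (show m < n by omega)]
    refine dictOf_congr (fun i _ => ?_)
    by_cases him : i = m
    · subst him; simp
    · by_cases hlt : i < m <;> simp [him, hlt] <;> omega

-- A's inner loop over the first line, starting from the empty dict: creates the keys in order
theorem inner_fold_empty (line : String) :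
    ∀ m, (List.range m).foldl (fun d (i : Nat) => cellStep line d (i : Int)) PySem.Dict.empty
      = dictOf m (fun i => PySem.Dict.counter [keyOf line (i : Int)]) := by
  intro m
  induction m with
  | zero => rfl
  | succ m ih =>
    rw [List.range_succ, List.foldl_append, ih]
    simp only [List.foldl_cons, List.foldl_nil, cellStep]
    rw [modify_dictOf_absent]
    refine dictOf_congr (fun i _ => ?_)
    by_cases him : i = m
    · subst him
      simp [PySem.Dict.counter]
    · simp [him]

-- the remaining lines, starting from a full state
theorem outer_fold (n : Nat) :
    ∀ (rest ls : List String),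
      rest.foldl (fun d line =>
          (List.range n).foldl (fun d (i : Nat) => cellStep line d (i : Int)) d)
        (dictOf n (fun i => PySem.Dict.counter (ls.map (fun l => keyOf l (i : Int)))))
      = dictOf n (fun i =>
          PySem.Dict.counter ((ls ++ rest).map (fun l => keyOf l (i : Int)))) := by
  intro rest
  induction rest with
  | nil => intro ls; simp
  | cons y ys ih =>
    intro ls
    simp only [List.foldl_cons]
    rw [inner_fold_full y n _ n le_rfl]
    have hone : (dictOf n (fun i =>
        if i < n then (PySem.Dict.counter (ls.map (fun l => keyOf l (i : Int)))).modify
          (keyOf y (i : Int)) 0 (· + 1)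
        else PySem.Dict.counter (ls.map (fun l => keyOf l (i : Int)))))
        = dictOf n (fun i =>
            PySem.Dict.counter ((ls ++ [y]).map (fun l => keyOf l (i : Int)))) := by
      refine dictOf_congr (fun i hi => ?_)
      rw [if_pos hi, List.map_append, List.map_cons, List.map_nil,
        PySem.Dict.counter_append_singleton]
    rw [hone, ih (ls ++ [y])]
    simp

-- A's port reaches the canonical form
theorem a_eq_canonical (y : String) (ys : List String) :
    build_column_frequencies (y :: ys) = canonical y.toList.length (y :: ys) := by
  unfold build_column_frequencies canonical
  simp only [PySem.List.pyGetD_zero_cons, PySem.Str.len_eq, PySem.List.pyRange_zero_natCast]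
  set n := y.toList.length with hn
  have hstep : (fun (res : PySem.Dict Int (PySem.Dict String Int)) (line : String) =>
      List.foldl (fun res i =>
        (if res.contains i = true then res else res.insert i PySem.Dict.empty).modify i
          PySem.Dict.empty
          (fun c => c.modify (String.ofList [PySem.List.pyGetD line.toList i ' ']) 0
            (· + 1)))
        res ((List.range n).map (fun (k : Nat) => (k : Int))))
      = (fun res line =>
          (List.range n).foldl (fun d (i : Nat) => cellStep line d (i : Int)) res) := by
    funext res line
    rw [List.foldl_map]
    have hfun : (fun (res : PySem.Dict Int (PySem.Dict String Int)) (i : Nat) =>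
        (if res.contains (i : Int) = true then res
         else res.insert (i : Int) PySem.Dict.empty).modify (i : Int)
          PySem.Dict.empty
          (fun c => c.modify (String.ofList [PySem.List.pyGetD line.toList (i : Int) ' '])
            0 (· + 1)))
        = fun d (i : Nat) => cellStep line d (i : Int) := by
      funext d i
      exact step_eq line d (i : Int)
    rw [hfun]
  rw [hstep]
  simp only [List.foldl_cons]
  rw [inner_fold_empty y n]
  have hsingle : (dictOf n (fun i => PySem.Dict.counter [keyOf y (i : Int)]))
      = dictOf n (fun i =>
          PySem.Dict.counter ([y].map (fun l => keyOf l (i : Int)))) := by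
    refine dictOf_congr (fun i _ => ?_); simp
  rw [hsingle, outer_fold n ys [y]]
  simp only [dictOf, List.map_map, List.singleton_append]
  refine List.map_congr_left (fun i _ => ?_)
  simp [keyOf]

-- ===== B-side lemmas =====

-- select column i's entry out of a flat-counter item / a cell pair
def sel (i : Nat) (p : (Int × String) × Int) : Option (String × Int) :=
  if p.1.1 = (i : Int) then some (p.1.2, p.2) else none

def proj (i : Nat) (p : Int × String) : Option String :=
  if p.1 = (i : Int) then some p.2 else none

-- B's regrouping loop, distributed over the columns of the full initial dict
theorem regroup_fold (n : Nat) :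
    ∀ (L : List ((Int × String) × Int)) (c : Nat → PySem.Dict String Int),
      (∀ p ∈ L, ∃ j, j < n ∧ p.1.1 = (j : Int)) →
      L.foldl (fun r p =>
          r.modify p.1.1 PySem.Dict.empty (fun cc => cc.insert p.1.2 p.2)) (dictOf n c)
        = dictOf n (fun i =>
            (L.filterMap (sel i)).foldl (fun cc q => cc.insert q.1 q.2) (c i)) := by
  intro L
  induction L with
  | nil => intro c _; simp
  | cons p L ih =>
    intro c hmem
    obtain ⟨j, hj, hpj⟩ := hmem p (by simp)
    simp only [List.foldl_cons]
    rw [hpj, modify_dictOf c hj]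
    rw [ih _ (fun q hq => hmem q (by simp [hq]))]
    refine dictOf_congr (fun i hi => ?_)
    by_cases hij : i = j
    · subst hij
      simp [sel, hpj]
    · have : sel i p = none := by
        simp only [sel, hpj]
        have : ((j : Int) : Int) ≠ (i : Int) := by
          simp only [ne_eq, Int.natCast_inj]; omega
        simp [this]
      simp [this, hij]

-- selecting from counter items = projecting the key set, paired with the flat counts
theorem filterMap_sel_map (i : Nat) (cnt : Int × String → Int) :
    ∀ (S : List (Int × String)),
      (S.map (fun k => (k, cnt k))).filterMap (sel i)
        = (S.filterMap (proj i)).map (fun ch => (ch, cnt ((i : Int), ch))) := by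
  intro S
  induction S with
  | nil => rfl
  | cons k S ih =>
    obtain ⟨a, ch⟩ := k
    rw [List.map_cons, List.filterMap_cons, List.filterMap_cons]
    by_cases ha : a = (i : Int)
    · subst ha
      have h1 : sel i (((i : Int), ch), cnt ((i : Int), ch))
          = some (ch, cnt ((i : Int), ch)) := by simp [sel]
      have h2 : proj i ((i : Int), ch) = some ch := by simp [proj]
      rw [h1, h2, List.map_cons, ih]
    · have h1 : sel i ((a, ch), cnt (a, ch)) = none := by simp [sel, ha]
      have h2 : proj i (a, ch) = none := by simp [proj, ha]
      rw [h1, h2, ih]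

-- membership transfer between the flat pair list and its column-i projection
theorem mem_filterMap_proj (i : Nat) (F : List (Int × String)) (ch : String) :
    ch ∈ F.filterMap (proj i) ↔ ((i : Int), ch) ∈ F := by
  rw [List.mem_filterMap]
  constructor
  · rintro ⟨p, hp, hsel⟩
    simp only [proj] at hsel
    split at hsel
    · next h =>
      obtain ⟨a, b⟩ := p
      simp only at h hsel
      cases hsel
      subst h
      exact hp
    · exact absurd hsel (by simp)
  · intro h
    exact ⟨((i : Int), ch), h, by simp [proj]⟩

-- dedup commutes with column projection
theorem ofList_filterMap_proj (i : Nat) :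
    ∀ (F : List (Int × String)),
      (PySem.Set.ofList F).filterMap (proj i)
        = PySem.Set.ofList (F.filterMap (proj i)) := by
  intro F
  induction F using List.reverseRecOn with
  | nil => rfl
  | append_singleton F p ih =>
    rw [PySem.Set.ofList_append_singleton, PySem.Set.add_eq_ite, List.filterMap_append]
    by_cases hmem : p ∈ PySem.Set.ofList F
    · rw [if_pos hmem]
      rw [ih]
      rcases hp : proj i p with _ | ch
      · simp [hp]
      · have hpch : p = ((i : Int), ch) := by
          simp only [proj] at hp
          split at hp
          · next h =>
            obtain ⟨a, b⟩ := p
            simp only at h hp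
            cases hp; subst h; rfl
          · exact absurd hp (by simp)
        have : ch ∈ PySem.Set.ofList (F.filterMap (proj i)) := by
          rw [PySem.Set.mem_ofList, mem_filterMap_proj]
          rw [PySem.Set.mem_ofList] at hmem
          exact hpch ▸ hmem
        rw [List.filterMap_cons, hp]
        simp only [List.filterMap_nil]
        rw [PySem.Set.ofList_append_singleton, PySem.Set.add_of_mem this]
    · rw [if_neg hmem, List.filterMap_append, ih]
      rcases hp : proj i p with _ | ch
      · simp [hp]
      · have hpch : p = ((i : Int), ch) := by
          simp only [proj] at hp
          split at hp
          · next h =>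
            obtain ⟨a, b⟩ := p
            simp only at h hp
            cases hp; subst h; rfl
          · exact absurd hp (by simp)
        have : ch ∉ PySem.Set.ofList (F.filterMap (proj i)) := by
          rw [PySem.Set.mem_ofList, mem_filterMap_proj]
          rw [PySem.Set.mem_ofList] at hmem
          exact fun hc => hmem (hpch ▸ hc)
        rw [List.filterMap_cons, hp]
        simp only [List.filterMap_nil]
        rw [PySem.Set.ofList_append_singleton, PySem.Set.add_of_not_mem this]

-- projecting one line's cell block to column i < n keeps exactly its cell
theorem filterMap_proj_block (n i : Nat) (hi : i < n) (l : String) :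
    ((List.range n).map (fun (j : Nat) => ((j : Int), keyOf l (j : Int)))).filterMap (proj i)
      = [keyOf l (i : Int)] := by
  rw [List.filterMap_map]
  have hgen : ∀ m, (List.range m).filterMap
      (fun (j : Nat) => proj i (((j : Int), keyOf l (j : Int))))
      = if i < m then [keyOf l (i : Int)] else [] := by
    intro m
    induction m with
    | zero => simp
    | succ m ihm =>
      rw [List.range_succ, List.filterMap_append, ihm]
      by_cases heq : i = m
      · subst heq
        simp [proj]
      · have hmi : ¬ m = i := by omega
        by_cases him : i < m
        · have h1 : i < m + 1 := by omega
          simp [him, h1, proj, hmi]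
        · have h1 : ¬ i < m + 1 := by omega
          simp [him, h1, proj, hmi]
  simp only [Function.comp_def]
  rw [hgen n, if_pos hi]

-- the flat cell list, projected to column i < n, is exactly column i
theorem filterMap_proj_flat (n i : Nat) (hi : i < n) (lines : List String) :
    (lines.flatMap (fun line =>
        (List.range n).map (fun (j : Nat) => ((j : Int), keyOf line (j : Int))))).filterMap (proj i)
      = lines.map (fun l => keyOf l (i : Int)) := by
  induction lines with
  | nil => rfl
  | cons y ys ih =>
    rw [List.flatMap_cons, List.filterMap_append, filterMap_proj_block n i hi y, ih]
    rfl

-- counting a (column, char) pair = counting the char in the projected list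
theorem count_pair_eq_count_proj (i : Nat) (ch : String) :
    ∀ (P : List (Int × String)),
      P.count ((i : Int), ch) = (P.filterMap (proj i)).count ch := by
  intro P
  induction P with
  | nil => rfl
  | cons p P ih =>
    rw [List.count_cons, List.filterMap_cons]
    rcases hp : proj i p with _ | ch'
    · have : p ≠ ((i : Int), ch) := by
        intro h; subst h; simp [proj] at hp
      simp [this, ih]
    · have hpch : p = ((i : Int), ch') := by
        simp only [proj] at hp
        split at hp
        · next h =>
          obtain ⟨a, b⟩ := p
          simp only at h hp
          cases hp; subst h; rfl
        · exact absurd hp (by simp)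
      subst hpch
      rw [List.count_cons, ih]
      by_cases hc : ch' = ch
      · subst hc; simp
      · have h1 : ¬ (((i : Int), ch') = ((i : Int), ch)) := by simp [hc]
        simp [hc, h1]

-- B's port reaches the canonical form
theorem b_eq_canonical (y : String) (ys : List String) :
    build_column_frequencies_alt (y :: ys) = canonical y.toList.length (y :: ys) := by
  unfold build_column_frequencies_alt canonical
  simp only [PySem.List.pyGetD_zero_cons, PySem.Str.len_eq, PySem.List.pyRange_zero_natCast]
  set n := y.toList.length with hn
  set lines : List String := y :: ys with hlines
  set F : List (Int × String) := lines.flatMap (fun line =>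
      (List.range n).map (fun (j : Nat) => ((j : Int), keyOf line (j : Int)))) with hF
  have hFrw : lines.flatMap (fun line =>
      ((List.range n).map (fun k : Nat => (k : Int))).map (fun i =>
        (i, String.ofList [PySem.List.pyGetD line.toList i ' ']))) = F := by
    rw [hF]
    have hfun : (fun (line : String) =>
        ((List.range n).map (fun k : Nat => (k : Int))).map (fun i =>
          (i, String.ofList [PySem.List.pyGetD line.toList i ' '])))
        = fun (line : String) =>
            (List.range n).map (fun (j : Nat) => ((j : Int), keyOf line (j : Int))) := by
      funext line
      rw [List.map_map]
      rfl
    rw [hfun]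
  rw [hFrw]
  have hres0 : PySem.Dict.mk (((List.range n).map (fun k : Nat => (k : Int))).map
      (fun i => (i, (PySem.Dict.empty : PySem.Dict String Int))))
      = dictOf n (fun _ => PySem.Dict.empty) := by
    simp [dictOf, List.map_map, Function.comp]
  rw [hres0]
  rw [PySem.Dict.items_counter]
  rw [regroup_fold n _ _ (by
    intro p hp
    simp only [List.mem_map] at hp
    obtain ⟨k, hk, rfl⟩ := hp
    rw [PySem.Set.mem_ofList, hF] at hk
    simp only [List.mem_flatMap, List.mem_map] at hk
    obtain ⟨line, _, j, hj, rfl⟩ := hk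
    exact ⟨j, List.mem_range.1 hj, rfl⟩)]
  simp only [dictOf, List.map_map]
  refine List.map_congr_left (fun i hiM => ?_)
  have hi : i < n := List.mem_range.1 hiM
  simp only [Function.comp]
  congr 1
  -- the column-i slice of the flat counter's items is column i's counter items
  have hslice : ((PySem.Set.ofList F).map
        (fun k => (k, (F.count k : Int)))).filterMap (sel i)
      = (PySem.Dict.counter (lines.map (fun l => keyOf l (i : Int)))).items := by
    rw [filterMap_sel_map i _ (PySem.Set.ofList F)]
    rw [ofList_filterMap_proj i F]
    rw [filterMap_proj_flat n i hi lines]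
    rw [PySem.Dict.items_counter]
    refine List.map_congr_left (fun ch _ => ?_)
    rw [count_pair_eq_count_proj i ch F, filterMap_proj_flat n i hi lines]
  rw [hslice]
  -- inserting the counter's items (fresh distinct keys) into an empty dict reproduces them
  have hfresh := PySem.Dict.items_foldl_insert_fresh
    (l := (PySem.Dict.counter (lines.map (fun l => keyOf l (i : Int)))).items)
    (k := Prod.fst) (v := Prod.snd) (d := (PySem.Dict.empty : PySem.Dict String Int))
    (by intro a _; simp [PySem.Dict.contains, PySem.Dict.empty])
    (by
      have : ((PySem.Dict.counter (lines.map (fun l => keyOf l (i : Int)))).items.map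
          Prod.fst) = (PySem.Dict.counter (lines.map (fun l => keyOf l (i : Int)))).keys := rfl
      rw [this, PySem.Dict.keys_counter]
      exact PySem.Set.nodup_ofList _)
  simp only [PySem.Dict.empty] at hfresh
  calc ((PySem.Dict.counter (lines.map (fun l => keyOf l (i : Int)))).items.foldl
          (fun cc q => cc.insert q.1 q.2) PySem.Dict.empty).items
      = (PySem.Dict.empty : PySem.Dict String Int).items
          ++ (PySem.Dict.counter (lines.map (fun l => keyOf l (i : Int)))).items.map
              (fun a => (a.1, a.2)) := hfresh
    _ = (PySem.Dict.counter (lines.map (fun l => keyOf l (i : Int)))).items := by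
          simp [PySem.Dict.empty]

-- ===== VERDICT (by name: the statement is the Claim_ definition above) =====
theorem build_column_frequencies_spec : Claim_equal_build_column_frequencies := by
  intro lines _ _
  unfold Spec_build_column_frequencies
  cases lines with
  | nil => rfl
  | cons y ys => rw [a_eq_canonical, b_eq_canonical]
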